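-- pv_equiv track=rewrite | github.com/yburanova/adventofcode | 2025/day01.py | follow_command
-- ===== SOURCE A (Python) =====
-- def follow_command(initial, command):
--     direction, turns = command
--     if direction == 'R':
--         initial = initial + turns
--     else:
--         initial = initial - turns
--
--     while initial < 0:
--         initial += 100
--     while initial > 99:
--         initial -= 100
--
--     return initial
-- ===== SOURCE B (Python) =====
-- def follow_command(initial, command):
--     direction, turns = command
--     delta = turns if direction == 'R' else -turns
--     return (initial + delta) % 100
-- ===== Notes on version B (the rewrite author's own statement) =====
-- stated objective: simpler
-- what changed: Replaces the two wrap-around while loops with a single closed-form modulo: the signed adjustment is reduced mod 100 directly.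
import Mathlib
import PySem

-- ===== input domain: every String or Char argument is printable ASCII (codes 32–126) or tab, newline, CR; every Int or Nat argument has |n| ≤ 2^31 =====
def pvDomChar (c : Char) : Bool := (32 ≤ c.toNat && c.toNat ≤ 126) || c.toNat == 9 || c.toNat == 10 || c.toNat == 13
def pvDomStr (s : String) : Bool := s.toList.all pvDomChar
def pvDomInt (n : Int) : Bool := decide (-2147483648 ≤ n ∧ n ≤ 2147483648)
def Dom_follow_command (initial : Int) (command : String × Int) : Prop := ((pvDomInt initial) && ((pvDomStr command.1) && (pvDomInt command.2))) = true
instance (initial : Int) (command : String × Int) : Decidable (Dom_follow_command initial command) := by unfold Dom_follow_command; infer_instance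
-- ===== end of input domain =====

-- B replaces A's two wrap-around while loops with one closed-form Python modulo (same value, simpler).

-- ===== PORT A =====
-- while initial < 0: initial += 100
def pvAddLoop (x : Int) : Int :=
  if x < 0 then pvAddLoop (x + 100) else x
termination_by (-x).toNat
decreasing_by omega

-- while initial > 99: initial -= 100
def pvSubLoop (x : Int) : Int :=
  if x > 99 then pvSubLoop (x - 100) else x
termination_by x.toNat
decreasing_by omega

def follow_command (initial : Int) (command : String × Int) : Int :=
  let direction := command.1
  let turns := command.2
  let initial1 := if direction == "R" then initial + turns else initial - turns
  pvSubLoop (pvAddLoop initial1)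

-- ===== PORT B =====
def follow_command_alt (initial : Int) (command : String × Int) : Int :=
  let direction := command.1
  let turns := command.2
  let delta := if direction == "R" then turns else -turns
  PySem.Int.mod (initial + delta) 100

-- ===== PRECONDITION & SPEC =====
def Spec_follow_command (initial : Int) (command : String × Int) (out : Int) : Prop := out = follow_command_alt initial command
instance (initial : Int) (command : String × Int) (out : Int) : Decidable (Spec_follow_command initial command out) := by unfold Spec_follow_command; infer_instance

-- ===== CLAIM (what is proved, stated in full; the proofs are below) =====
def Claim_equal_follow_command : Prop := ∀ (initial : Int) (command : String × Int), Dom_follow_command initial command → Spec_follow_command initial command (follow_command initial command)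

-- ===== LEMMAS AND PROOFS =====
theorem pvAddLoop_emod (x : Int) : (pvAddLoop x) % 100 = x % 100 := by
  induction x using pvAddLoop.induct with
  | case1 x h ih => rw [pvAddLoop, if_pos h, ih, Int.add_emod_right]
  | case2 x h => rw [pvAddLoop, if_neg h]

theorem pvAddLoop_nonneg (x : Int) : 0 ≤ pvAddLoop x := by
  induction x using pvAddLoop.induct with
  | case1 x h ih => rw [pvAddLoop, if_pos h]; exact ih
  | case2 x h => rw [pvAddLoop, if_neg h]; omega

theorem pvSubLoop_eq (x : Int) (hx : 0 ≤ x) : pvSubLoop x = x % 100 := by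
  induction x using pvSubLoop.induct with
  | case1 x h ih =>
      rw [pvSubLoop, if_pos h, ih (by omega)]
      omega
  | case2 x h =>
      rw [pvSubLoop, if_neg h, Int.emod_eq_of_lt hx (by omega)]

theorem pvLoops_eq_emod (x : Int) : pvSubLoop (pvAddLoop x) = x % 100 := by
  rw [pvSubLoop_eq _ (pvAddLoop_nonneg x), pvAddLoop_emod]

-- ===== VERDICT (by name: the statement is the Claim_ definition above) =====
theorem follow_command_spec : Claim_equal_follow_command := by
  intro initial command _
  unfold Spec_follow_command follow_command follow_command_alt
  simp only []
  rw [pvLoops_eq_emod, PySem.Int.mod_eq_emod_of_pos (by norm_num)]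
  split <;> ring_nf
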